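-- pv_equiv track=rewrite | github.com/yunior123/leetcode_top_150 | contest/trailing_zeros.py | hasTrailingZeros2
-- ===== SOURCE A (Python) =====
-- from typing import List
--
-- def hasTrailingZeros2(nums: List[int]) -> bool:
--     result = False
--     for i in range(len(nums)):
--         for j in range(i+1, len(nums)):
--             if (nums[i] | nums[j]) & 1 == 0:
--                 result = True
--                 break
--     return result
-- ===== SOURCE B (Python) =====
-- from typing import List
--
-- def hasTrailingZeros2(nums: List[int]) -> bool:
--     count = 0
--     for x in nums:
--         if x & 1 == 0:
--             count += 1
--             if count == 2:
--                 return True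
--     return False
-- ===== Notes on version B (the rewrite author's own statement) =====
-- stated objective: faster
-- what changed: Replaces A's nested scan over all index pairs with a single pass that maintains a running count of even numbers and returns True as soon as the second one is seen.
import Mathlib
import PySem

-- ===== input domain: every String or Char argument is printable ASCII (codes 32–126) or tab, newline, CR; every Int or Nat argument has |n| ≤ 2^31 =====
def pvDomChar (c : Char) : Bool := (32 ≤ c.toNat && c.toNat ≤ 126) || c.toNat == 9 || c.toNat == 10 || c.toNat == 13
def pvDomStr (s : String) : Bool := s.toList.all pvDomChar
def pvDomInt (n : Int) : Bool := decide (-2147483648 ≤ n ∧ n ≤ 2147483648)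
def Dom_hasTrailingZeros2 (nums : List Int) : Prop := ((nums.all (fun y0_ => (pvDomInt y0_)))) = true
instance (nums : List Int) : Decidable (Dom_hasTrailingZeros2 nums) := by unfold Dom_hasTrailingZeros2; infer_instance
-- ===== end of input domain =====

-- B replaces A's nested scan over all index pairs with a single pass counting even numbers
-- and returning True at the second one (objective: faster).


-- ===== PORT A =====
-- inner 'for j in range(i+1, len(nums))' with its break: sets result True and stops at the
-- first pair, otherwise passes the incoming result through
def innerA (nums : List Int) (i : Int) : List Int → Bool → Bool
  | [], result => result
  | j :: js, result =>
    if PySem.Int.band (PySem.Int.bor (PySem.List.pyGetD nums i 0) (PySem.List.pyGetD nums j 0)) 1 == 0 then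
      true
    else innerA nums i js result

def hasTrailingZeros2 (nums : List Int) : Bool :=
  (PySem.List.pyRange 0 (nums.length : Int) 1).foldl
    (fun result i => innerA nums i (PySem.List.pyRange (i + 1) (nums.length : Int) 1) result) false

-- ===== PORT B =====
-- single pass with a running count of even numbers; early return at the second one
def altGo : List Int → Int → Bool
  | [], _ => false
  | x :: rest, count =>
    if PySem.Int.band x 1 == 0 then
      if count + 1 == 2 then true else altGo rest (count + 1)
    else altGo rest count

def hasTrailingZeros2_alt (nums : List Int) : Bool := altGo nums 0

-- ===== PRECONDITION & SPEC =====
def Spec_hasTrailingZeros2 (nums : List Int) (out : Bool) : Prop := out = hasTrailingZeros2_alt nums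
instance (nums : List Int) (out : Bool) : Decidable (Spec_hasTrailingZeros2 nums out) := by unfold Spec_hasTrailingZeros2; infer_instance

-- ===== CLAIM (what is proved, stated in full; the proofs are below) =====
def Claim_equal_hasTrailingZeros2 : Prop := ∀ (nums : List Int), Dom_hasTrailingZeros2 nums → Spec_hasTrailingZeros2 nums (hasTrailingZeros2 nums)

-- ===== LEMMAS AND PROOFS =====

-- parity of Nat bitwise or/and through % 2
theorem nat_or_mod2 (u v : Nat) : (u ||| v) % 2 = u % 2 ||| v % 2 := by
  rw [← Nat.and_one_is_mod, ← Nat.and_one_is_mod, ← Nat.and_one_is_mod, Nat.and_or_distrib_right]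

theorem nat_and_mod2 (u v : Nat) : (u &&& v) % 2 = (u % 2) &&& (v % 2) := by
  rw [← Nat.and_one_is_mod u, ← Nat.and_one_is_mod v, ← Nat.and_one_is_mod (u &&& v)]
  have h : (u &&& 1) &&& (v &&& 1) = (u &&& v) &&& (1 &&& 1) := by ac_rfl
  rw [h, Nat.and_self]

theorem nat_or_even (u v : Nat) : (u ||| v) % 2 = 0 ↔ (u % 2 = 0 ∧ v % 2 = 0) := by
  rw [nat_or_mod2]
  rcases Nat.mod_two_eq_zero_or_one u with h1|h1 <;> rcases Nat.mod_two_eq_zero_or_one v with h2|h2 <;>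
    rw [h1, h2] <;> simp

theorem nat_and_odd (u v : Nat) : (u &&& v) % 2 = 1 ↔ (u % 2 = 1 ∧ v % 2 = 1) := by
  rw [nat_and_mod2]
  rcases Nat.mod_two_eq_zero_or_one u with h1|h1 <;> rcases Nat.mod_two_eq_zero_or_one v with h2|h2 <;>
    rw [h1, h2] <;> simp

-- '(a | b) & 1 == 0' is 'a & 1 == 0 and b & 1 == 0'
theorem bor_band_one (a b : Int) :
    (PySem.Int.band (PySem.Int.bor a b) 1 == 0) = ((PySem.Int.band a 1 == 0) && (PySem.Int.band b 1 == 0)) := by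
  have hm : ∀ c : Int, PySem.Int.band c 1 = c % 2 := fun c => by
    rw [PySem.Int.band_one]; exact PySem.Int.mod_eq_emod_of_pos (by norm_num)
  rw [hm, hm, hm]
  rw [Bool.eq_iff_iff]; simp only [beq_iff_eq, Bool.and_eq_true]
  unfold PySem.Int.bor
  split_ifs with ha hb hb
  · have hx := nat_or_even a.toNat b.toNat; omega
  · have hx := nat_and_odd (-b - 1).toNat a.toNat
    have hle := (Nat.and_le_left : (-b - 1).toNat &&& a.toNat ≤ _)
    have h2 := Nat.mod_two_eq_zero_or_one ((-b - 1).toNat &&& a.toNat)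
    omega
  · have hx := nat_and_odd (-a - 1).toNat b.toNat
    have hle := (Nat.and_le_left : (-a - 1).toNat &&& b.toNat ≤ _)
    have h2 := Nat.mod_two_eq_zero_or_one ((-a - 1).toNat &&& b.toNat)
    omega
  · have hx := nat_and_odd (-a - 1).toNat (-b - 1).toNat
    have h2 := Nat.mod_two_eq_zero_or_one ((-a - 1).toNat &&& (-b - 1).toNat)
    omega

-- the Python-even test used throughout
def evB (x : Int) : Bool := PySem.Int.band x 1 == 0

-- B's loop returns exactly 'at least 2 - count more evens are in the list' while 0 ≤ count ≤ 1
theorem altGo_spec (l : List Int) : ∀ c : Int, 0 ≤ c → c ≤ 1 →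
    altGo l c = decide (2 ≤ c + l.countP evB) := by
  induction l with
  | nil => intro c h0 h1; simp [altGo]; omega
  | cons x t ih =>
    intro c h0 h1
    by_cases hx : evB x
    · have hx' : (PySem.Int.band x 1 == 0) = true := hx
      have hcnt : (x :: t).countP evB = t.countP evB + 1 := by
        simp [hx]
      rcases (by omega : c = 0 ∨ c = 1) with rfl | rfl
      · simp only [altGo, hx', if_pos]
        norm_num
        rw [ih 1 (by omega) (by omega), hcnt, Bool.eq_iff_iff]
        simp only [decide_eq_true_eq]
        omega
      · simp only [altGo, hx', if_pos]
        norm_num [hcnt]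
        omega
    · have hx' : (PySem.Int.band x 1 == 0) = false := by
        simpa [evB] using hx
      have hcnt : (x :: t).countP evB = t.countP evB := by
        simp [hx]
      simp only [altGo, hx', Bool.false_eq_true, if_neg, not_false_iff]
      rw [ih c h0 h1, hcnt]

-- A's inner loop is: incoming result OR 'some j in the range makes the pair even'
theorem innerA_spec (nums : List Int) (i : Int) : ∀ (js : List Int) (r : Bool),
    innerA nums i js r =
      (r || js.any (fun j =>
        PySem.Int.band (PySem.Int.bor (PySem.List.pyGetD nums i 0) (PySem.List.pyGetD nums j 0)) 1 == 0)) := by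
  intro js
  induction js with
  | nil => intro r; simp [innerA]
  | cons j t ih =>
    intro r
    by_cases h : (PySem.Int.band (PySem.Int.bor (PySem.List.pyGetD nums i 0) (PySem.List.pyGetD nums j 0)) 1 == 0)
    · simp [innerA, h]
    · simp only [innerA, h, if_neg, Bool.false_eq_true, not_false_iff, List.any_cons]
      rw [ih r]
      simp

-- folding 'r := r || f i' is 'initial || any f'
theorem foldl_or_any (f : Int → Bool) : ∀ (l : List Int) (b : Bool),
    l.foldl (fun r i => r || f i) b = (b || l.any f) := by
  intro l
  induction l with
  | nil => intro b; simp
  | cons x t ih => intro b; simp only [List.foldl_cons, List.any_cons, ih, Bool.or_assoc]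

-- 'c && ·' distributes out of any
theorem any_and_left (c : Bool) (f : Int → Bool) (l : List Int) :
    l.any (fun x => c && f x) = (c && l.any f) := by
  cases c <;> simp

-- any respects pointwise equality on members
theorem any_congr_mem {α : Type} (l : List α) (f g : α → Bool) (h : ∀ x ∈ l, f x = g x) :
    l.any f = l.any g := by
  induction l with
  | nil => rfl
  | cons x t ih =>
    simp only [List.any_cons, h x (List.mem_cons_self), ih (fun y hy => h y (List.mem_cons_of_mem x hy))]

-- countP through any
theorem any_iff_countP (l : List Int) : l.any evB = decide (1 ≤ l.countP evB) := by
  rw [Bool.eq_iff_iff]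
  simp only [List.any_eq_true, decide_eq_true_eq]
  rw [show (1 ≤ l.countP evB) ↔ 0 < l.countP evB from by omega, List.countP_pos_iff]

-- the outer index scan of 'some later even partner for an even element' counts two evens
theorem outer_any : ∀ (l : List Int),
    (PySem.List.pyRange 0 (l.length : Int) 1).any
      (fun i => evB (PySem.List.pyGetD l i 0) && (l.drop (i + 1).toNat).any evB)
    = decide (2 ≤ l.countP evB) := by
  intro l
  induction l with
  | nil => simp [PySem.List.pyRange_one_eq_nil]
  | cons x t ih =>
    have hlen : (((x :: t).length : Int)) = (t.length : Int) + 1 := by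
      push_cast [List.length_cons]; ring
    rw [hlen, PySem.List.pyRange_one_cons (by positivity)]
    simp only [List.any_cons]
    have hf0 : (evB (PySem.List.pyGetD (x :: t) 0 0) && ((x :: t).drop ((0 : Int) + 1).toNat).any evB)
        = (evB x && t.any evB) := by
      norm_num [PySem.List.pyGetD]
    have hshift : (PySem.List.pyRange (0 + 1) ((t.length : Int) + 1) 1).any
          (fun i => evB (PySem.List.pyGetD (x :: t) i 0) && ((x :: t).drop (i + 1).toNat).any evB)
        = (PySem.List.pyRange 0 (t.length : Int) 1).any
          (fun i => evB (PySem.List.pyGetD t i 0) && (t.drop (i + 1).toNat).any evB) := by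
      rw [PySem.List.pyRange_one (0 + 1), PySem.List.pyRange_one 0]
      have h1 : (((t.length : Int) + 1) - (0 + 1)).toNat = t.length := by omega
      have h2 : ((t.length : Int) - 0).toNat = t.length := by omega
      rw [h1, h2, List.any_map, List.any_map]
      apply any_congr_mem
      intro k _
      show (evB (PySem.List.pyGetD (x :: t) (0 + 1 + (k : Int)) 0) && ((x :: t).drop ((0 + 1 + (k : Int)) + 1).toNat).any evB)
          = (evB (PySem.List.pyGetD t (0 + (k : Int)) 0) && (t.drop ((0 + (k : Int)) + 1).toNat).any evB)
      have e1 : (0 + 1 + (k : Int)) = ((k + 1 : Nat) : Int) := by omega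
      have e2 : (0 + (k : Int)) = ((k : Nat) : Int) := by omega
      rw [e1, e2, PySem.List.pyGetD_natCast, PySem.List.pyGetD_natCast]
      have e3 : (((k + 1 : Nat) : Int) + 1).toNat = k + 2 := by omega
      have e4 : (((k : Nat) : Int) + 1).toNat = k + 1 := by omega
      rw [e3, e4]
      rfl
    rw [hf0, hshift, ih]
    by_cases hx : evB x
    · have hcnt : (x :: t).countP evB = t.countP evB + 1 := by simp [hx]
      rw [hx, Bool.true_and, any_iff_countP, Bool.eq_iff_iff, hcnt]
      simp only [Bool.or_eq_true, decide_eq_true_eq]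
      omega
    · have hx' : evB x = false := by simpa using hx
      have hcnt : (x :: t).countP evB = t.countP evB := by simp [hx']
      rw [hx', Bool.false_and, Bool.false_or, hcnt]

-- A in closed any-any form, then reduced to the count
theorem A_eq_count (nums : List Int) :
    hasTrailingZeros2 nums = decide (2 ≤ nums.countP evB) := by
  unfold hasTrailingZeros2
  have hbody : (fun (result : Bool) (i : Int) =>
        innerA nums i (PySem.List.pyRange (i + 1) (nums.length : Int) 1) result)
      = (fun (r : Bool) (i : Int) => r ||
          (PySem.List.pyRange (i + 1) (nums.length : Int) 1).any (fun j =>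
            PySem.Int.band (PySem.Int.bor (PySem.List.pyGetD nums i 0) (PySem.List.pyGetD nums j 0)) 1 == 0)) := by
    funext r i
    exact innerA_spec nums i _ r
  rw [hbody, foldl_or_any, Bool.false_or]
  rw [any_congr_mem _ _
      (fun i => evB (PySem.List.pyGetD nums i 0) && (nums.drop (i + 1).toNat).any evB) ?_]
  · exact outer_any nums
  · intro i hi
    have h0i : 0 ≤ i := (PySem.List.mem_pyRange_one.mp hi).1
    have hcond : (fun j =>
          PySem.Int.band (PySem.Int.bor (PySem.List.pyGetD nums i 0) (PySem.List.pyGetD nums j 0)) 1 == 0)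
        = (fun j => evB (PySem.List.pyGetD nums i 0) && evB (PySem.List.pyGetD nums j 0)) := by
      funext j; exact bor_band_one _ _
    have hmap := PySem.List.map_pyGetD_pyRange' (a := i + 1) nums 0 (by omega)
    beta_reduce
    rw [hcond, any_and_left, ← hmap, List.any_map]
    rfl

-- ===== VERDICT (by name: the statement is the Claim_ definition above) =====
theorem hasTrailingZeros2_spec : Claim_equal_hasTrailingZeros2 := by
  intro nums _
  unfold Spec_hasTrailingZeros2 hasTrailingZeros2_alt
  rw [A_eq_count, altGo_spec nums 0 (by omega) (by omega)]
  norm_num
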